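-- pv_equiv track=rewrite | github.com/ljaewon97/Algorithm | Programmers/KAKAO/Level 2/괄호 변환.py | solution
-- ===== SOURCE A (Python) =====
-- def checkBracket(a):
--     stk = []
--     for i in a:
--         if i == '(':
--             stk.append(i)
--         else:
--             if not stk:
--                 return False
--             else:
--                 stk.pop()
--     if stk:
--         return False
--     else:
--         return True
--
-- def solution(p):
--     if not p:
--         return p
--
--     u = ''
--     while p:
--         u += p[0]
--         p = p[1:]
--         if u.count('(') == u.count(')'):
--             break
--     v = p
--
--     if checkBracket(u):
--         return u + solution(v)
--     else:
--         answer = '(' + solution(v) + ')'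
--         u = u[1:-1]
--         for i in u:
--             if i == '(':
--                 answer += ')'
--             else:
--                 answer += '('
--         return answer
-- ===== SOURCE B (Python) =====
-- def solution(p):
--     # one forward pass over p; segments found with two running counters,
--     # output assembled iteratively from parts (no recursion, no re-counting)
--     pre = []       # parts emitted left-to-right
--     post = []      # wrap-up parts, to be appended in reverse order
--     n = len(p)
--     start = 0
--     while start < n:
--         bal = 0    # '(' vs ')' balance: segment ends when it returns to 0
--         b = 0      # all-char counter for the "correct" check ('(' push, else pop)
--         ok = True
--         i = start
--         while i < n:
--             c = p[i]
--             if c == '(':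
--                 bal += 1
--                 b += 1
--             else:
--                 if c == ')':
--                     bal -= 1
--                 b -= 1
--                 if b < 0:
--                     ok = False
--             i += 1
--             if bal == 0:
--                 break
--         if ok and b != 0:
--             ok = False
--         u = p[start:i]
--         if ok:
--             pre.append(u)
--         else:
--             pre.append('(')
--             post.append(')' + ''.join(')' if ch == '(' else '(' for ch in u[1:-1]))
--         start = i
--     post.reverse()
--     return ''.join(pre) + ''.join(post)
-- ===== Notes on version B (the rewrite author's own statement) =====
-- stated objective: faster
-- what changed: Replaces A's recursion with per-character string slicing and repeated full-prefix count() calls by a single iterative forward pass: two running counters find each segment and check it at once, the explicit stack becomes a counter, and the output is assembled from collected parts joined at the end.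
import Mathlib
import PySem

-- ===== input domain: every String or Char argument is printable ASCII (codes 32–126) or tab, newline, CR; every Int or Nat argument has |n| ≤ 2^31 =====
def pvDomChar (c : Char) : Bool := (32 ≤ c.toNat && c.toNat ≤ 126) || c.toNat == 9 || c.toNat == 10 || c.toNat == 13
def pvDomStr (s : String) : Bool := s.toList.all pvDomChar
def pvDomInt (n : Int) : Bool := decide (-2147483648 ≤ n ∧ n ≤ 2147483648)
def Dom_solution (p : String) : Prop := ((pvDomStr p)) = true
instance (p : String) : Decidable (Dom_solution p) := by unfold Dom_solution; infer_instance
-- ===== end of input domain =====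

-- B replaces A's recursion with repeated slicing/re-counting by one iterative
-- forward pass: two running counters find each segment and check it at once,
-- and the output is assembled from collected parts; objective: faster.

-- ===== PORT A =====

-- checkBracket's for-loop: stack stk, push on '(', else pop (False on empty pop)
def cbLoop : List Char → List Char → Bool
  | [], stk => if stk.isEmpty then true else false
  | c :: rest, stk =>
    if c = '(' then cbLoop rest (c :: stk)
    else
      match stk with
      | [] => false
      | _ :: s => cbLoop rest s

def checkBracket (a : List Char) : Bool := cbLoop a []

-- A's while loop: u += p[0]; p = p[1:]; break when u.count('(') == u.count(')')
def solWhile : List Char → List Char → List Char × List Char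
  | u, [] => (u, [])
  | u, c :: rest =>
    let u' := u ++ [c]
    if u'.count '(' = u'.count ')' then (u', rest) else solWhile u' rest

theorem solWhile_snd_le : ∀ (p u : List Char), ((solWhile u p).2).length ≤ p.length := by
  intro p
  induction p with
  | nil => intro u; simp [solWhile]
  | cons c rest ih =>
    intro u
    simp only [solWhile]
    by_cases h : (u ++ [c]).count '(' = (u ++ [c]).count ')'
    · simp [h]
    · simp only [h, if_false]
      exact le_trans (ih _) (by simp)

theorem solWhile_cons_lt (u c : _) (rest : List Char) :
    ((solWhile u (c :: rest)).2).length < (c :: rest).length := by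
  simp only [solWhile]
  by_cases h : (u ++ [c]).count '(' = (u ++ [c]).count ')'
  · simp [h]
  · simp only [h, if_false]
    have := solWhile_snd_le rest (u ++ [c])
    simp; omega

-- A's for-loop building `answer += ')' if i=='(' else '('`
def flipLoop : List Char → List Char → List Char
  | acc, [] => acc
  | acc, c :: rest => flipLoop (acc ++ [if c = '(' then ')' else '(']) rest

def solutionA : List Char → List Char
  | [] => []
  | c :: rest =>
    let uv := solWhile [] (c :: rest)
    let u := uv.1
    let v := uv.2
    if checkBracket u then u ++ solutionA v
    else flipLoop (('(' :: solutionA v) ++ [')']) (PySem.List.slice u (some 1) (some (-1)))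
termination_by p => p.length
decreasing_by
  all_goals exact solWhile_cons_lt [] c rest

def solution (p : String) : String := String.ofList (solutionA p.toList)

-- ===== PORT B =====

-- B's inner while: one pass over the chars from position `start` (passed here as the
-- suffix list; index i kept relative to `start`, same arithmetic): bal finds the
-- segment end, b/ok run the correctness check; returns (i, ok, b) at the break
def segLoop : List Char → Int → Int → Bool → Nat → Nat × Bool × Int
  | [], _, b, ok, i => (i, ok, b)
  | c :: rest, bal, b, ok, i =>
    if c = '(' then
      let bal' := bal + 1
      let b' := b + 1
      let i' := i + 1
      if bal' = 0 then (i', ok, b') else segLoop rest bal' b' ok i'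
    else
      let bal' := if c = ')' then bal - 1 else bal
      let b' := b - 1
      let ok' := if b' < 0 then false else ok
      let i' := i + 1
      if bal' = 0 then (i', ok', b') else segLoop rest bal' b' ok' i'

theorem segLoop_ge : ∀ (s : List Char) (bal b : Int) (ok : Bool) (i : Nat),
    i ≤ (segLoop s bal b ok i).1 := by
  intro s
  induction s with
  | nil => intro bal b ok i; simp [segLoop]
  | cons c rest ih =>
    intro bal b ok i
    simp only [segLoop]
    by_cases hc : c = '('
    · simp only [if_pos hc]
      by_cases h : bal + 1 = 0
      · simp only [if_pos h]; omega
      · simp only [if_neg h]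
        exact le_trans (Nat.le_succ i) (ih _ _ _ (i + 1))
    · simp only [if_neg hc]
      by_cases h : (if c = ')' then bal - 1 else bal) = 0
      · simp only [if_pos h]; omega
      · simp only [if_neg h]
        exact le_trans (Nat.le_succ i) (ih _ _ _ (i + 1))

theorem segLoop_cons_pos (c : Char) (rest : List Char) (bal b : Int) (ok : Bool) :
    1 ≤ (segLoop (c :: rest) bal b ok 0).1 := by
  simp only [segLoop]
  by_cases hc : c = '('
  · simp only [if_pos hc]
    by_cases h : bal + 1 = 0
    · simp only [if_pos h]; omega
    · simp only [if_neg h]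
      exact le_trans (by omega) (segLoop_ge rest _ _ _ 1)
  · simp only [if_neg hc]
    by_cases h : (if c = ')' then bal - 1 else bal) = 0
    · simp only [if_pos h]; omega
    · simp only [if_neg h]
      exact le_trans (by omega) (segLoop_ge rest _ _ _ 1)

-- B's outer while: one segment per iteration; pre collects left-to-right parts,
-- post collects the wrap-up parts (joined in reverse order afterwards)
def outerLoop : List Char → List (List Char) → List (List Char) →
    List (List Char) × List (List Char)
  | [], pre, post => (pre, post)
  | c :: rest, pre, post =>
    let r := segLoop (c :: rest) 0 0 true 0
    let i := r.1
    let ok0 := r.2.1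
    let b := r.2.2
    let ok := if ok0 ∧ b ≠ 0 then false else ok0   -- `if ok and b != 0: ok = False`
    let u := (c :: rest).take i                     -- p[start:i] (0 ≤ i ≤ len): exact
    if ok then outerLoop ((c :: rest).drop i) (pre ++ [u]) post
    else outerLoop ((c :: rest).drop i) (pre ++ [['(']])
      (post ++ [')' :: (PySem.List.slice u (some 1) (some (-1))).map
        (fun ch => if ch = '(' then ')' else '(')])
termination_by s => s.length
decreasing_by
  all_goals
    have h1 := segLoop_cons_pos c rest 0 0 true
    simp only [List.length_drop, List.length_cons]
    omega

def solutionB (p : List Char) : List Char :=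
  let r := outerLoop p [] []
  r.1.flatten ++ r.2.reverse.flatten   -- ''.join(pre) + ''.join(reversed post)

def solution_alt (p : String) : String := String.ofList (solutionB p.toList)

-- ===== PRECONDITION & SPEC =====
def Spec_solution (p : String) (out : String) : Prop := out = solution_alt p
instance (p : String) (out : String) : Decidable (Spec_solution p out) := by unfold Spec_solution; infer_instance

-- ===== CLAIM (what is proved, stated in full; the proofs are below) =====
def Claim_equal_solution : Prop := ∀ (p : String), Dom_solution p → Spec_solution p (solution p)

-- ===== LEMMAS AND PROOFS =====

-- reference split-index loop (proof device relating the two programs)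
def splitLoop : List Char → Int → Nat → Nat
  | [], _, i => i
  | c :: rest, bal, i =>
    let bal' := if c = '(' then bal + 1 else if c = ')' then bal - 1 else bal
    let i' := i + 1
    if bal' = 0 then i' else splitLoop rest bal' i'

-- reference correctness counter (proof device): none = went negative
def okLoop : List Char → Int → Option Int
  | [], b => some b
  | c :: rest, b =>
    let b' := if c = '(' then b + 1 else b - 1
    if b' < 0 then none else okLoop rest b'

theorem splitLoop_ge : ∀ (p : List Char) (bal : Int) (i : Nat), i ≤ splitLoop p bal i := by
  intro p
  induction p with
  | nil => intro bal i; simp [splitLoop]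
  | cons c rest ih =>
    intro bal i
    simp only [splitLoop]
    by_cases h : (if c = '(' then bal + 1 else if c = ')' then bal - 1 else bal) = 0
    · simp only [if_pos h]; omega
    · simp only [if_neg h]
      exact le_trans (Nat.le_succ i) (ih _ (i + 1))

theorem splitLoop_cons_pos (c : Char) (rest : List Char) (bal : Int) :
    1 ≤ splitLoop (c :: rest) bal 0 := by
  simp only [splitLoop]
  by_cases h : (if c = '(' then bal + 1 else if c = ')' then bal - 1 else bal) = 0
  · simp only [if_pos h]; omega
  · simp only [if_neg h]
    exact le_trans (by omega) (splitLoop_ge rest _ 1)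

theorem splitLoop_shift : ∀ (p : List Char) (bal : Int) (i : Nat),
    splitLoop p bal i = splitLoop p bal 0 + i := by
  intro p
  induction p with
  | nil => intro bal i; simp [splitLoop]
  | cons c rest ih =>
    intro bal i
    simp only [splitLoop]
    by_cases h : (if c = '(' then bal + 1 else if c = ')' then bal - 1 else bal) = 0
    · simp only [if_pos h]; omega
    · simp only [if_neg h]
      rw [ih _ (i + 1), ih _ 1]; omega

-- A's while loop lands where the reference counter loop says
theorem solWhile_eq_split : ∀ (p u : List Char) (bal : Int),
    bal = (u.count '(' : Int) - (u.count ')' : Int) →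
    solWhile u p = (u ++ p.take (splitLoop p bal 0), p.drop (splitLoop p bal 0)) := by
  intro p
  induction p with
  | nil => intro u bal _; simp [solWhile, splitLoop]
  | cons c rest ih =>
    intro u bal hbal
    have hbal' : (if c = '(' then bal + 1 else if c = ')' then bal - 1 else bal)
        = ((u ++ [c]).count '(' : Int) - ((u ++ [c]).count ')' : Int) := by
      by_cases h1 : c = '('
      · simp [h1, List.count_append, hbal]; omega
      · by_cases h2 : c = ')'
        · simp [h2, List.count_append, hbal]; omega
        · have h1' : ¬ ('(' = c) := fun h => h1 h.symm
          have h2' : ¬ (')' = c) := fun h => h2 h.symm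
          simp [h1, h2, List.count_append, hbal]
    simp only [solWhile, splitLoop]
    by_cases hz : (u ++ [c]).count '(' = (u ++ [c]).count ')'
    · have : (if c = '(' then bal + 1 else if c = ')' then bal - 1 else bal) = 0 := by
        rw [hbal']; omega
      simp [hz, this]
    · have hnz : ¬ (if c = '(' then bal + 1 else if c = ')' then bal - 1 else bal) = 0 := by
        rw [hbal']; intro h; apply hz; omega
      simp only [hz, if_false, if_neg hnz]
      rw [splitLoop_shift rest _ 1, ih (u ++ [c]) _ hbal']
      simp [List.take_succ_cons, List.drop_succ_cons]

-- checkBracket's stack is tracked exactly by the reference counter (= stack height)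
theorem cbLoop_eq_okLoop : ∀ (a stk : List Char),
    cbLoop a stk = (match okLoop a (stk.length : Int) with
      | none => false
      | some b => decide (b = 0)) := by
  intro a
  induction a with
  | nil =>
    intro stk
    cases stk <;> simp [cbLoop, okLoop]
    omega
  | cons c rest ih =>
    intro stk
    simp only [cbLoop, okLoop]
    by_cases hc : c = '('
    · have hneg : ¬ ((stk.length : Int) + 1 < 0) := by omega
      simp only [hc, if_true, if_neg hneg]
      rw [ih ('(' :: stk)]
      have hcast : ((('(' :: stk).length : Int)) = (stk.length : Int) + 1 := by
        push_cast [List.length_cons]; ring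
      rw [hcast]
    · simp only [hc, if_false]
      cases stk with
      | nil => simp
      | cons x s =>
        have hpos : ¬ ((((x :: s).length : Int)) - 1 < 0) := by
          simp only [List.length_cons]; push_cast; omega
        simp only [if_neg hpos]
        rw [ih s]
        have hcast2 : ((x :: s).length : Int) - 1 = (s.length : Int) := by
          push_cast [List.length_cons]; ring
        rw [hcast2]

theorem flipLoop_eq_map : ∀ (u acc : List Char),
    flipLoop acc u = acc ++ u.map (fun ch => if ch = '(' then ')' else '(') := by
  intro u
  induction u with
  | nil => intro acc; simp [flipLoop]
  | cons c rest ih => intro acc; simp [flipLoop, ih]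

-- the value okLoop returns, when it returns one
theorem okLoop_some_val : ∀ (u : List Char) (b bb : Int),
    okLoop u b = some bb → bb = b + 2 * (u.count '(' : Int) - (u.length : Int) := by
  intro u
  induction u with
  | nil => intro b bb h; simp [okLoop] at h; simp [h]
  | cons c rest ih =>
    intro b bb h
    simp only [okLoop] at h
    by_cases hneg : (if c = '(' then b + 1 else b - 1) < 0
    · simp [hneg] at h
    · simp only [if_neg hneg] at h
      have := ih _ _ h
      by_cases hc : c = '('
      · simp only [hc, if_true] at this
        simp [hc, this, List.length_cons]
        ring
      · simp only [hc, if_false] at this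
        simp [hc, this, List.length_cons]
        ring

-- B's fused inner loop, one step: both branches of segLoop follow the same scheme
theorem segLoop_cons_eq (c : Char) (rest : List Char) (bal b : Int) (ok : Bool) (i : Nat)
    (hb : 0 ≤ b ∨ ok = false) :
    segLoop (c :: rest) bal b ok i =
      (if (if c = '(' then bal + 1 else if c = ')' then bal - 1 else bal) = 0
       then (i + 1, (if (if c = '(' then b + 1 else b - 1) < 0 then false else ok),
             (if c = '(' then b + 1 else b - 1))
       else segLoop rest (if c = '(' then bal + 1 else if c = ')' then bal - 1 else bal)
              (if c = '(' then b + 1 else b - 1)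
              (if (if c = '(' then b + 1 else b - 1) < 0 then false else ok) (i + 1)) := by
  by_cases hc : c = '('
  · subst hc
    have hok : (if b + 1 < 0 then false else ok) = ok := by
      rcases hb with hb | hb
      · rw [if_neg (by omega)]
      · simp [hb]
    simp [segLoop, hok]
  · simp [segLoop, hc]

-- B's fused inner loop = reference split index + reference check + counter value
theorem segLoop_spec : ∀ (s : List Char) (bal b : Int) (ok : Bool) (i : Nat),
    (0 ≤ b ∨ ok = false) →
    segLoop s bal b ok i =
      ( splitLoop s bal 0 + i,
        (if (okLoop (s.take (splitLoop s bal 0)) b).isSome then ok else false),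
        b + 2 * ((s.take (splitLoop s bal 0)).count '(' : Int)
          - ((s.take (splitLoop s bal 0)).length : Int) ) := by
  intro s
  induction s with
  | nil =>
    intro bal b ok i hb
    rcases hb with hb | hb <;> simp [segLoop, splitLoop, okLoop, hb]
  | cons c rest ih =>
    intro bal b ok i hb
    rw [segLoop_cons_eq c rest bal b ok i hb]
    have hsplit : splitLoop (c :: rest) bal 0
        = (if (if c = '(' then bal + 1 else if c = ')' then bal - 1 else bal) = 0
           then 1
           else splitLoop rest (if c = '(' then bal + 1 else if c = ')' then bal - 1 else bal) 0 + 1) := by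
      simp only [splitLoop]
      by_cases h : (if c = '(' then bal + 1 else if c = ')' then bal - 1 else bal) = 0
      · simp [h]
      · simp only [if_neg h]
        rw [splitLoop_shift rest _ 1]
    have hb1 : (if c = '(' then b + 1 else b - 1) ≥ 0 ∨
        (if (if c = '(' then b + 1 else b - 1) < 0 then false else ok) = false := by
      by_cases hneg : (if c = '(' then b + 1 else b - 1) < 0
      · right; simp [hneg]
      · left; omega
    have hcnt : okLoop [c] b
        = (if (if c = '(' then b + 1 else b - 1) < 0 then none
           else some (if c = '(' then b + 1 else b - 1)) := by
      simp only [okLoop]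
    by_cases hz : (if c = '(' then bal + 1 else if c = ')' then bal - 1 else bal) = 0
    · -- segment ends right after this char: the prefix taken is [c]
      rw [if_pos hz, hsplit, if_pos hz]
      simp only [List.take_succ_cons, List.take_zero]
      have h2 : (if (if c = '(' then b + 1 else b - 1) < 0 then false else ok)
          = (if (okLoop [c] b).isSome then ok else false) := by
        by_cases hneg : (if c = '(' then b + 1 else b - 1) < 0
        · simp [hcnt, hneg]
        · simp [hcnt, hneg]
      have h3 : (if c = '(' then b + 1 else b - 1)
          = b + 2 * (([c].count '(' : Int)) - (([c].length : Int)) := by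
        by_cases hc : c = '(' <;> simp [hc]
        omega
      rw [h2, h3]
      simp only [Prod.mk.injEq]
      exact ⟨by omega, rfl, trivial⟩
    · -- segment continues: peel c off the taken prefix
      rw [if_neg hz, hsplit, if_neg hz]
      rw [ih _ _ _ _ hb1]
      have htake : (c :: rest).take
          (splitLoop rest (if c = '(' then bal + 1 else if c = ')' then bal - 1 else bal) 0 + 1)
          = c :: rest.take (splitLoop rest (if c = '(' then bal + 1 else if c = ')' then bal - 1 else bal) 0) := by
        simp [List.take_succ_cons]
      rw [htake]
      have hok : okLoop (c :: rest.take (splitLoop rest (if c = '(' then bal + 1 else if c = ')' then bal - 1 else bal) 0)) b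
          = (if (if c = '(' then b + 1 else b - 1) < 0 then none
             else okLoop (rest.take (splitLoop rest (if c = '(' then bal + 1 else if c = ')' then bal - 1 else bal) 0)) (if c = '(' then b + 1 else b - 1)) := by
        simp only [okLoop]
      have h2 : (if (okLoop (rest.take (splitLoop rest (if c = '(' then bal + 1 else if c = ')' then bal - 1 else bal) 0)) (if c = '(' then b + 1 else b - 1)).isSome
            then (if (if c = '(' then b + 1 else b - 1) < 0 then false else ok) else false)
          = (if (okLoop (c :: rest.take (splitLoop rest (if c = '(' then bal + 1 else if c = ')' then bal - 1 else bal) 0)) b).isSome then ok else false) := by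
        by_cases hneg : (if c = '(' then b + 1 else b - 1) < 0
        · simp [hok, hneg]
        · simp [hok, hneg]
      rw [h2]
      simp only [Prod.mk.injEq]
      refine ⟨by omega, trivial, ?_⟩
      by_cases hc : c = '(' <;> simp [hc] <;> ring

-- checkBracket agrees with B's fused verdict (ok0 = no-negative, b = final counter)
theorem check_eq_fused (u : List Char) :
    checkBracket u
      = (if ((if (okLoop u 0).isSome then true else false)
             ∧ (0 + 2 * (u.count '(' : Int) - (u.length : Int)) ≠ 0)
         then false
         else (if (okLoop u 0).isSome then true else false)) := by
  have hcb := cbLoop_eq_okLoop u []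
  rcases hok : okLoop u 0 with _ | bb
  · simp only [checkBracket, hcb, List.length_nil, Int.natCast_zero, hok]
    simp
  · have hbb := okLoop_some_val u 0 bb hok
    simp only [checkBracket, hcb, List.length_nil, Int.natCast_zero, hok]
    rw [← hbb]
    by_cases hz : bb = 0
    · simp [hz]
    · simp [hz]

-- the outer loop carries A's recursion as an accumulator invariant
theorem outerLoop_spec : ∀ (n : Nat) (s : List Char), s.length ≤ n →
    ∀ (pre post : List (List Char)),
    (outerLoop s pre post).1.flatten ++ (outerLoop s pre post).2.reverse.flatten
      = pre.flatten ++ solutionA s ++ post.reverse.flatten := by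
  intro n
  induction n with
  | zero =>
    intro s hs pre post
    have : s = [] := by cases s <;> simp_all
    subst this
    simp [outerLoop, solutionA]
  | succ n ih =>
    intro s hs pre post
    cases s with
    | nil => simp [outerLoop, solutionA]
    | cons c rest =>
      rw [outerLoop]
      rw [segLoop_spec (c :: rest) 0 0 true 0 (Or.inl le_rfl)]
      rw [solutionA]
      rw [solWhile_eq_split (c :: rest) [] 0 (by simp)]
      have hrec := ih ((c :: rest).drop (splitLoop (c :: rest) 0 0))
        (by
          have h1 := splitLoop_cons_pos c rest 0
          simp only [List.length_drop, List.length_cons]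
          simp only [List.length_cons] at hs
          omega)
      simp only [List.nil_append, Nat.add_zero]
      rw [check_eq_fused ((c :: rest).take (splitLoop (c :: rest) 0 0))]
      by_cases hok : (if ((if (okLoop ((c :: rest).take (splitLoop (c :: rest) 0 0)) 0).isSome then true else false)
             ∧ (0 + 2 * (((c :: rest).take (splitLoop (c :: rest) 0 0)).count '(' : Int) - (((c :: rest).take (splitLoop (c :: rest) 0 0)).length : Int)) ≠ 0)
         then false
         else (if (okLoop ((c :: rest).take (splitLoop (c :: rest) 0 0)) 0).isSome then true else false)) = true
      · simp only [if_pos hok]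
        rw [hrec]
        simp [List.flatten_append, List.append_assoc]
      · simp only [if_neg hok]
        rw [hrec]
        simp [List.flatten_append, List.append_assoc, flipLoop_eq_map]

theorem solutionA_eq_solutionB : ∀ (p : List Char), solutionA p = solutionB p := by
  intro p
  have h := outerLoop_spec p.length p le_rfl [] []
  simp only [List.flatten_nil, List.reverse_nil, List.append_nil, List.nil_append] at h
  simp [solutionB, h]

-- ===== VERDICT (by name: the statement is the Claim_ definition above) =====
theorem solution_spec : Claim_equal_solution := by
  intro p _
  unfold Spec_solution solution solution_alt
  rw [solutionA_eq_solutionB]
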